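-- pv_equiv track=rewrite | github.com/smpn9malang/PsychologicalScreening | utils/screening_tools.py | get_srq29_subscale_scores
-- ===== SOURCE A (Python) =====
-- def get_srq29_subscale_scores(answers):
--     """Get subscale scores for SRQ-29"""
--     # Anxiety/depression (1-20)
--     anxiety_depression = sum(1 for key, value in answers.items() if value and key.startswith("srq_") and 1 <= int(key.split("_")[1]) <= 20)
--
--     # Psychotic symptoms (21-24)
--     psychotic = sum(1 for key, value in answers.items() if value and key.startswith("srq_") and 21 <= int(key.split("_")[1]) <= 24)
--
--     # Epileptic seizures (25)
--     epileptic = 1 if answers.get("srq_25", False) else 0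
--
--     # Alcohol use (26-29)
--     alcohol = sum(1 for key, value in answers.items() if value and key.startswith("srq_") and 26 <= int(key.split("_")[1]) <= 29)
--
--     return {
--         "anxiety_depression": anxiety_depression,
--         "psychotic": psychotic,
--         "epileptic": epileptic,
--         "alcohol": alcohol
--     }
-- ===== SOURCE B (Python) =====
-- def get_srq29_subscale_scores(answers):
--     """Get subscale scores for SRQ-29 (single pass over the answers)."""
--     epileptic = 1 if answers.get("srq_25", False) else 0
--     anxiety_depression = psychotic = alcohol = 0
--     for key, value in answers.items():
--         if value and key.startswith("srq_"):
--             n = int(key.split("_")[1])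
--             if 1 <= n <= 20:
--                 anxiety_depression += 1
--             elif 21 <= n <= 24:
--                 psychotic += 1
--             elif 26 <= n <= 29:
--                 alcohol += 1
--     return {
--         "anxiety_depression": anxiety_depression,
--         "psychotic": psychotic,
--         "epileptic": epileptic,
--         "alcohol": alcohol
--     }
-- ===== Notes on version B (the rewrite author's own statement) =====
-- stated objective: faster
-- what changed: Replaces A's three separate generator-sum passes over the answers (one per numeric range, each re-parsing every key) by a single loop that parses each key's number once and classifies it into the three counters; the epileptic score stays a direct dict lookup as in A.
import Mathlib
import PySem

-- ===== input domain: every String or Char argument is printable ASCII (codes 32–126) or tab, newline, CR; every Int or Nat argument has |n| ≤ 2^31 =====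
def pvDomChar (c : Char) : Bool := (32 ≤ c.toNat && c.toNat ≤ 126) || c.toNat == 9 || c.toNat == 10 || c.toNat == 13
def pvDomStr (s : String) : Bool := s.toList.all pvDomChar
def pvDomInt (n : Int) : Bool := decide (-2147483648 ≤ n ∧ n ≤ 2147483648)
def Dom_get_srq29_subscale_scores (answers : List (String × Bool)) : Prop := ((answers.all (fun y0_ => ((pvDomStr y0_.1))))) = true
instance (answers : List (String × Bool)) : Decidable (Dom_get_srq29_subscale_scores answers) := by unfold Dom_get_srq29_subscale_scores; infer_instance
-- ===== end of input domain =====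

-- B replaces A's three separate counting passes (each re-parsing every key) by one loop that parses and classifies each key once (objective: faster, constant-factor; measured).

-- Shared helper: int(key.split("_")[1]) — `none` exactly where Python raises (excluded by Pre_);
-- the total form pvNum takes 0 as an arbitrary default, only ever reached outside Pre_ or when the guard is false.
def pvNum? (k : String) : Option Int :=
  (PySem.List.pyGet? ((PySem.Str.split? k "_").getD []) 1).bind PySem.Int.ofStr?

def pvNum (k : String) : Int := (pvNum? k).getD 0

-- dict.get("srq_25", False): first match in the association list
def pvGet25 (answers : List (String × Bool)) : Bool :=
  (((answers.find? (fun kv => kv.1 == "srq_25")).map (·.2)).getD false)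

-- ===== PORT A =====
-- one generator-sum of A: sum(1 for key, value in answers.items() if value and key.startswith("srq_") and lo <= int(...) <= hi)
def pvCountA (answers : List (String × Bool)) (lo hi : Int) : Int :=
  answers.foldl (fun acc kv =>
    if kv.2 && PySem.Str.startswith kv.1 "srq_" && decide (lo ≤ pvNum kv.1 ∧ pvNum kv.1 ≤ hi)
    then acc + 1 else acc) 0

def get_srq29_subscale_scores (answers : List (String × Bool)) : List (String × Int) :=
  let anxiety_depression := pvCountA answers 1 20
  let psychotic := pvCountA answers 21 24
  let epileptic : Int := if pvGet25 answers then 1 else 0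
  let alcohol := pvCountA answers 26 29
  [("anxiety_depression", anxiety_depression), ("psychotic", psychotic),
   ("epileptic", epileptic), ("alcohol", alcohol)]

-- ===== PORT B =====
-- single pass: the three mutable counters become a triple accumulator
def pvStepB (acc : Int × Int × Int) (kv : String × Bool) : Int × Int × Int :=
  if kv.2 && PySem.Str.startswith kv.1 "srq_" then
    let n := pvNum kv.1
    if 1 ≤ n ∧ n ≤ 20 then (acc.1 + 1, acc.2.1, acc.2.2)
    else if 21 ≤ n ∧ n ≤ 24 then (acc.1, acc.2.1 + 1, acc.2.2)
    else if 26 ≤ n ∧ n ≤ 29 then (acc.1, acc.2.1, acc.2.2 + 1)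
    else acc
  else acc

def get_srq29_subscale_scores_alt (answers : List (String × Bool)) : List (String × Int) :=
  let epileptic : Int := if pvGet25 answers then 1 else 0
  let t := answers.foldl pvStepB (0, 0, 0)
  [("anxiety_depression", t.1), ("psychotic", t.2.1),
   ("epileptic", epileptic), ("alcohol", t.2.2)]

-- ===== PRECONDITION & SPEC =====
-- Pre_ excludes exactly the inputs where Python A raises ValueError: a truthy key starting
-- with "srq_" whose segment after the first "_" is not an int literal.
def Pre_get_srq29_subscale_scores (answers : List (String × Bool)) : Prop :=
  ∀ kv ∈ answers, kv.2 = true → PySem.Str.startswith kv.1 "srq_" = true → (pvNum? kv.1).isSome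
instance (answers : List (String × Bool)) : Decidable (Pre_get_srq29_subscale_scores answers) := by
  unfold Pre_get_srq29_subscale_scores; infer_instance

def pvWitness_get_srq29_subscale_scores : (List (String × Bool)) :=
  [("srq_1", true), ("srq_25", true), ("srq_27", false), ("other", true)]

def Spec_get_srq29_subscale_scores (answers : List (String × Bool)) (out : List (String × Int)) : Prop := out = get_srq29_subscale_scores_alt answers
instance (answers : List (String × Bool)) (out : List (String × Int)) : Decidable (Spec_get_srq29_subscale_scores answers out) := by unfold Spec_get_srq29_subscale_scores; infer_instance

-- ===== CLAIM (what is proved, stated in full; the proofs are below) =====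
def Claim_equal_get_srq29_subscale_scores : Prop := ∀ (answers : List (String × Bool)), Dom_get_srq29_subscale_scores answers → Pre_get_srq29_subscale_scores answers → Spec_get_srq29_subscale_scores answers (get_srq29_subscale_scores answers)

-- ===== LEMMAS AND PROOFS =====

def pvGuard (lo hi : Int) (kv : String × Bool) : Bool :=
  kv.2 && PySem.Str.startswith kv.1 "srq_" && decide (lo ≤ pvNum kv.1 ∧ pvNum kv.1 ≤ hi)

-- A's generator-sum is a countP (via the library loop-shape lemma).
theorem pvCountA_eq_countP (l : List (String × Bool)) (lo hi : Int) :
    pvCountA l lo hi = (l.countP (pvGuard lo hi) : Int) := by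
  unfold pvCountA
  have := PySem.List.foldl_count_if (pvGuard lo hi) l 0
  simpa [pvGuard] using this

-- B's single fold computes the three counts at once (the ranges are disjoint, so the elif chain splits).
theorem pvFold_eq (l : List (String × Bool)) : ∀ (a p al : Int),
    l.foldl pvStepB (a, p, al) =
      (a + (l.countP (pvGuard 1 20) : Int),
       p + (l.countP (pvGuard 21 24) : Int),
       al + (l.countP (pvGuard 26 29) : Int)) := by
  induction l with
  | nil => intro a p al; simp
  | cons kv tl ih =>
    intro a p al
    simp only [List.foldl_cons, List.countP_cons, ih]
    by_cases hg : kv.2 = true ∧ PySem.Chars.startswith kv.1.toList ['s', 'r', 'q', '_'] = true <;>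
      by_cases h1 : 1 ≤ pvNum kv.1 ∧ pvNum kv.1 ≤ 20 <;>
      by_cases h2 : 21 ≤ pvNum kv.1 ∧ pvNum kv.1 ≤ 24 <;>
      by_cases h3 : 26 ≤ pvNum kv.1 ∧ pvNum kv.1 ≤ 29 <;>
      simp [pvStepB, pvGuard, hg, h1, h2, h3] <;> omega

theorem pv_main (answers : List (String × Bool)) :
    get_srq29_subscale_scores answers = get_srq29_subscale_scores_alt answers := by
  simp only [get_srq29_subscale_scores, get_srq29_subscale_scores_alt, pvFold_eq,
    pvCountA_eq_countP, zero_add]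

-- ===== VERDICT (by name: the statement is the Claim_ definition above) =====
theorem get_srq29_subscale_scores_spec : Claim_equal_get_srq29_subscale_scores := by
  intro answers _ _
  unfold Spec_get_srq29_subscale_scores
  exact pv_main answers
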